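-- pv_equiv track=rewrite | github.com/Slash0BZ/pytorch-pretrained-BERT | scripts/process_typical_data.py | get_stripped_tmp_only
-- ===== SOURCE A (Python) =====
-- def get_stripped_tmp_only(tokens, tags, orig_verb_pos, label):
--     new_tokens = []
--     new_verb_pos = -1
--     for i in range(0, len(tokens)):
--         if "ARGM-TMP" not in tags[i]:
--             new_tokens.append(tokens[i])
--         else:
--             valid = True
--             for j in range(i, len(tokens)):
--                 if "ARGM-TMP" not in tags[j]:
--                     break
--                 if tokens[j].lower() == label.lower():
--                     valid = False
--                     break
--             for j in range(i, -1, -1):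
--                 if "ARGM-TMP" not in tags[j]:
--                     break
--                 if tokens[j].lower() == label.lower():
--                     valid = False
--                     break
--             if valid:
--                 new_tokens.append(tokens[i])
--         if i == orig_verb_pos:
--             new_verb_pos = len(new_tokens) - 1
--     return new_tokens, new_verb_pos
-- ===== SOURCE B (Python) =====
-- def get_stripped_tmp_only(tokens, tags, orig_verb_pos, label):
--     n = len(tokens)
--     lab = label.lower()
--     keep = [True] * n
--     i = 0
--     while i < n:
--         if "ARGM-TMP" in tags[i]:
--             j = i
--             while j < n and "ARGM-TMP" in tags[j]:
--                 j += 1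
--             if any(tokens[k].lower() == lab for k in range(i, j)):
--                 for k in range(i, j):
--                     keep[k] = False
--             i = j
--         else:
--             i += 1
--     new_tokens = []
--     new_verb_pos = -1
--     for i in range(n):
--         if keep[i]:
--             new_tokens.append(tokens[i])
--         if i == orig_verb_pos:
--             new_verb_pos = len(new_tokens) - 1
--     return new_tokens, new_verb_pos
-- ===== Notes on version B (the rewrite author's own statement) =====
-- stated objective: alternative
-- what changed: Instead of rescanning forward and backward from every ARGM-TMP token, B walks the tag sequence once, finds each maximal contiguous ARGM-TMP span, checks label presence once per span and marks the whole span keep/drop, then builds the output in one pass; it trades A's per-token rescans for a precomputed keep table.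
import Mathlib
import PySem

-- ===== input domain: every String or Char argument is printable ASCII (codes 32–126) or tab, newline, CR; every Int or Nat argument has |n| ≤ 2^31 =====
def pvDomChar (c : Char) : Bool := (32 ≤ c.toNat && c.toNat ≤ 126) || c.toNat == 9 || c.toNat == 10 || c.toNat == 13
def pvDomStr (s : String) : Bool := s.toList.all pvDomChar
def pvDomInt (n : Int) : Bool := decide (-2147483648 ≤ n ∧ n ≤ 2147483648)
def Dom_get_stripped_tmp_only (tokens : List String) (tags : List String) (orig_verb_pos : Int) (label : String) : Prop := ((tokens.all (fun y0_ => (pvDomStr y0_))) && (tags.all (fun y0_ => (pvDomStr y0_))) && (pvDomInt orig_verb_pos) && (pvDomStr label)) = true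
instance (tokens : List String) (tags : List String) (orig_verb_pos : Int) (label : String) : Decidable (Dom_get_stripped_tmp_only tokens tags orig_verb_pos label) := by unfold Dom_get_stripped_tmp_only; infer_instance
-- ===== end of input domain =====

-- B strips whole maximal ARGM-TMP spans in one linear pass instead of A's per-token
-- forward/backward rescans; return values proved equal on Pre_.

-- shared elementary tests ('"ARGM-TMP" in tags[i]' and 'tokens[k].lower() == label.lower()')
def tmpAt (tags : List String) (i : Nat) : Bool :=
  PySem.Str.isIn "ARGM-TMP" (tags.getD i "")

def matchAt (tokens : List String) (label : String) (k : Nat) : Bool :=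
  PySem.Str.lower (tokens.getD k "") == PySem.Str.lower label

-- ===== PORT A =====
-- the inner 'for j in range(i, len(tokens))' loop: True unless a label match is hit
-- before leaving the contiguous ARGM-TMP run
def gsFwd (tokens tags : List String) (label : String) (n i : Nat) : Bool :=
  if _h : i < n then
    if tmpAt tags i = false then true
    else if matchAt tokens label i then false
    else gsFwd tokens tags label n (i + 1)
  else true
termination_by n - i

-- the inner 'for j in range(i, -1, -1)' loop
def gsBwd (tokens tags : List String) (label : String) (i : Nat) : Bool :=
  if tmpAt tags i = false then true
  else if matchAt tokens label i then false
  else match i with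
    | 0 => true
    | k + 1 => gsBwd tokens tags label k

def get_stripped_tmp_only (tokens : List String) (tags : List String) (orig_verb_pos : Int) (label : String) : List String × Int :=
  (List.range tokens.length).foldl
    (fun st i =>
      let nt :=
        if tmpAt tags i = false then st.1 ++ [tokens.getD i ""]
        else
          -- 'valid' after both inner loops is exactly fwd && bwd
          if gsFwd tokens tags label tokens.length i && gsBwd tokens tags label i then
            st.1 ++ [tokens.getD i ""]
          else st.1
      (nt, if (i : Int) = orig_verb_pos then (nt.length : Int) - 1 else st.2))
    ([], -1)

-- ===== PORT B =====
-- 'while j < n and "ARGM-TMP" in tags[j]: j += 1'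
def blockEnd (tags : List String) (n j : Nat) : Nat :=
  if _h : j < n ∧ tmpAt tags j = true then blockEnd tags n (j + 1) else j
termination_by n - j

theorem le_blockEnd (tags : List String) (n j : Nat) : j ≤ blockEnd tags n j := by
  fun_induction blockEnd tags n j with
  | case1 j h ih => omega
  | case2 j h => omega

-- the outer while loop: the keep flags, one maximal TMP span at a time
def buildKeep (tokens tags : List String) (label : String) (n i : Nat) : List Bool :=
  if h : i < n then
    if ht : tmpAt tags i = true then
      let j := blockEnd tags n i
      let b := !((List.range' i (j - i)).any (matchAt tokens label))
      List.replicate (j - i) b ++ buildKeep tokens tags label n j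
    else true :: buildKeep tokens tags label n (i + 1)
  else []
termination_by n - i
decreasing_by
  · have h1 : i + 1 ≤ blockEnd tags n (i + 1) := le_blockEnd tags n (i + 1)
    have h2 : blockEnd tags n i = blockEnd tags n (i + 1) := by
      rw [blockEnd]; simp [h, ht]
    omega
  · omega

def get_stripped_tmp_only_alt (tokens : List String) (tags : List String) (orig_verb_pos : Int) (label : String) : List String × Int :=
  let n := tokens.length
  let keep := buildKeep tokens tags label n 0
  (List.range n).foldl
    (fun st i =>
      let nt := if keep.getD i true then st.1 ++ [tokens.getD i ""] else st.1
      (nt, if (i : Int) = orig_verb_pos then (nt.length : Int) - 1 else st.2))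
    ([], -1)

-- ===== PRECONDITION & SPEC =====
-- A raises IndexError (tags[i]) exactly when tags is shorter than tokens; excluded.
def Pre_get_stripped_tmp_only (tokens : List String) (tags : List String) (orig_verb_pos : Int) (label : String) : Prop :=
  tokens.length ≤ tags.length
instance (tokens : List String) (tags : List String) (orig_verb_pos : Int) (label : String) : Decidable (Pre_get_stripped_tmp_only tokens tags orig_verb_pos label) := by unfold Pre_get_stripped_tmp_only; infer_instance

def pvWitness_get_stripped_tmp_only : List String × List String × Int × String :=
  (["We", "met", "today", "now", "here"], ["O", "B-V", "B-ARGM-TMP", "I-ARGM-TMP", "O"], 1, "now")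

def Spec_get_stripped_tmp_only (tokens : List String) (tags : List String) (orig_verb_pos : Int) (label : String) (out : List String × Int) : Prop := out = get_stripped_tmp_only_alt tokens tags orig_verb_pos label
instance (tokens : List String) (tags : List String) (orig_verb_pos : Int) (label : String) (out : List String × Int) : Decidable (Spec_get_stripped_tmp_only tokens tags orig_verb_pos label out) := by unfold Spec_get_stripped_tmp_only; infer_instance

-- ===== CLAIM (what is proved, stated in full; the proofs are below) =====
def Claim_equal_get_stripped_tmp_only : Prop := ∀ (tokens : List String) (tags : List String) (orig_verb_pos : Int) (label : String), Dom_get_stripped_tmp_only tokens tags orig_verb_pos label → Pre_get_stripped_tmp_only tokens tags orig_verb_pos label → Spec_get_stripped_tmp_only tokens tags orig_verb_pos label (get_stripped_tmp_only tokens tags orig_verb_pos label)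

-- ===== LEMMAS AND PROOFS =====

-- A's per-token keep decision
def decA (tokens tags : List String) (label : String) (n m : Nat) : Bool :=
  if tmpAt tags m = true then gsFwd tokens tags label n m && gsBwd tokens tags label m else true

theorem blockEnd_le (tags : List String) (n j : Nat) (hj : j ≤ n) :
    blockEnd tags n j ≤ n := by
  fun_induction blockEnd tags n j with
  | case1 j h ih => exact ih (by omega)
  | case2 j h => omega

theorem blockEnd_tmp (tags : List String) (n j : Nat) :
    ∀ k, j ≤ k → k < blockEnd tags n j → tmpAt tags k = true := by
  fun_induction blockEnd tags n j with
  | case1 j h ih =>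
    intro k hk1 hk2
    rcases Nat.eq_or_lt_of_le hk1 with rfl | hlt
    · exact h.2
    · exact ih k hlt hk2
  | case2 j h => intro k hk1 hk2; omega

theorem blockEnd_stop (tags : List String) (n j : Nat) (hj : j ≤ n) :
    blockEnd tags n j = n ∨ tmpAt tags (blockEnd tags n j) = false := by
  fun_induction blockEnd tags n j with
  | case1 j h ih => exact ih (by omega)
  | case2 j h =>
    by_cases hlt : j < n
    · right; simpa [hlt] using h
    · left; omega

theorem gsFwd_char (tokens tags : List String) (label : String) (n i e : Nat)
    (hie : i ≤ e) (hen : e ≤ n)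
    (htmp : ∀ k, i ≤ k → k < e → tmpAt tags k = true)
    (hstop : e = n ∨ tmpAt tags e = false) :
    gsFwd tokens tags label n i
      = !((List.range' i (e - i)).any (matchAt tokens label)) := by
  obtain ⟨d, hd⟩ : ∃ d, e - i = d := ⟨_, rfl⟩
  induction d generalizing i with
  | zero =>
    have hie' : i = e := by omega
    subst hie'
    rw [gsFwd, hd]
    rcases hstop with rfl | hf
    · simp
    · simp [hf]
  | succ d ih =>
    have hlt : i < e := by omega
    have hin : i < n := by omega
    have hti : tmpAt tags i = true := htmp i le_rfl hlt
    rw [gsFwd, hd, List.range'_succ]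
    by_cases hm : matchAt tokens label i
    · simp [hin, hti, hm]
    · have : gsFwd tokens tags label n (i + 1)
          = !((List.range' (i + 1) d).any (matchAt tokens label)) := by
        have := ih (i + 1) (by omega) (fun k hk1 hk2 => htmp k (by omega) hk2) (by omega)
        simpa [show e - (i + 1) = d by omega] using this
      simp [hin, hti, hm, this]

theorem gsBwd_char (tokens tags : List String) (label : String) (s i : Nat)
    (hsi : s ≤ i)
    (htmp : ∀ k, s ≤ k → k ≤ i → tmpAt tags k = true)
    (hstart : s = 0 ∨ tmpAt tags (s - 1) = false) :
    gsBwd tokens tags label i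
      = !((List.range' s (i + 1 - s)).any (matchAt tokens label)) := by
  obtain ⟨d, hd⟩ : ∃ d, i - s = d := ⟨_, rfl⟩
  induction d generalizing i with
  | zero =>
    have hse : i = s := by omega
    subst hse
    have hti : tmpAt tags i = true := htmp i le_rfl le_rfl
    rw [gsBwd.eq_def]
    have h1 : i + 1 - i = 1 := by omega
    by_cases hm : matchAt tokens label i
    · simp [hti, hm, h1, List.range'_succ]
    · match i, hstart with
      | 0, _ => simp [hti, hm, h1, List.range'_succ]
      | (k + 1), hstart =>
        have hk : tmpAt tags k = false := by
          rcases hstart with h0 | hf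
          · omega
          · simpa using hf
        have hgk : gsBwd tokens tags label k = true := by
          rw [gsBwd.eq_def]; simp [hk]
        simp [hti, hm, h1, List.range'_succ, hgk]
  | succ d ih =>
    have hlt : s < i := by omega
    have hti : tmpAt tags i = true := htmp i hlt.le le_rfl
    have hsplit : List.range' s (i + 1 - s) = List.range' s (i - s) ++ [i] := by
      have h1 : i + 1 - s = (i - s) + 1 := by omega
      rw [h1, List.range'_1_concat, show s + (i - s) = i by omega]
    rw [gsBwd.eq_def, hsplit]
    by_cases hm : matchAt tokens label i
    · simp [hti, hm]
    · match i, hlt, hd with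
      | (k + 1), hlt, hd =>
        have hrec : gsBwd tokens tags label k
            = !((List.range' s (k + 1 - s)).any (matchAt tokens label)) := by
          exact ih k (by omega) (fun j hj1 hj2 => htmp j hj1 (by omega)) (by omega)
        have h2 : k + 1 - s = (k + 1) - s := rfl
        simp [hti, hm, hrec]

theorem buildKeep_eq_map (tokens tags : List String) (label : String) (n i : Nat)
    (hQ : tmpAt tags i = true → (i = 0 ∨ tmpAt tags (i - 1) = false)) :
    buildKeep tokens tags label n i
      = (List.range' i (n - i)).map (decA tokens tags label n) := by
  obtain ⟨d, hd⟩ : ∃ d, n - i = d := ⟨_, rfl⟩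
  induction d using Nat.strong_induction_on generalizing i with
  | _ d ih =>
  rw [buildKeep]
  by_cases hin : i < n
  · by_cases hti : tmpAt tags i = true
    · -- maximal TMP span [i, e)
      simp only [hin, hti, dif_pos]
      have hilt : i < blockEnd tags n i := by
        have h1 : blockEnd tags n i = blockEnd tags n (i + 1) := by
          rw [blockEnd]; simp [hin, hti]
        have := le_blockEnd tags n (i + 1)
        omega
      have hele : blockEnd tags n i ≤ n := blockEnd_le tags n i (by omega)
      have hbt := blockEnd_tmp tags n i
      have hbs := blockEnd_stop tags n i (by omega)
      set e := blockEnd tags n i with he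
      clear_value e
      have hsplit : List.range' i (n - i) = List.range' i (e - i) ++ List.range' e (n - e) := by
        rw [show n - i = (e - i) + (n - e) from by omega, ← List.range'_append_1,
          show i + (e - i) = e from by omega]
      rw [hsplit, List.map_append]
      congr 1
      · -- the span maps to a constant keep flag
        symm
        rw [List.eq_replicate_iff]
        refine ⟨by simp, ?_⟩
        intro x hx
        obtain ⟨m, hm, rfl⟩ := List.mem_map.mp hx
        rw [List.mem_range'_1] at hm
        have hmlt : m < e := by omega
        have htm : tmpAt tags m = true := hbt m hm.1 hmlt
        have hfwd := gsFwd_char tokens tags label n m e (by omega) hele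
          (fun k hk1 hk2 => hbt k (by omega) hk2) hbs
        have hbwd := gsBwd_char tokens tags label i m hm.1
          (fun k hk1 hk2 => hbt k hk1 (by omega)) (hQ hti)
        rw [decA, if_pos htm, hfwd, hbwd]
        obtain ⟨c, hc⟩ : ∃ c, e - m = c + 1 := ⟨e - m - 1, by omega⟩
        have hs1 : List.range' i (e - i) = List.range' i (m - i) ++ List.range' m (e - m) := by
          rw [show e - i = (m - i) + (e - m) from by omega, ← List.range'_append_1,
            show i + (m - i) = m from by omega]
        have hs2 : List.range' m (e - m) = m :: List.range' (m + 1) c := by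
          rw [hc, List.range'_succ]
        have hs3 : List.range' i (m + 1 - i) = List.range' i (m - i) ++ [m] := by
          rw [show m + 1 - i = (m - i) + 1 from by omega, List.range'_1_concat,
            show i + (m - i) = m from by omega]
        rw [hs1, hs2, hs3]
        cases hA : (List.range' i (m - i)).any (matchAt tokens label) <;>
          cases hC : (List.range' (m + 1) c).any (matchAt tokens label) <;>
          cases hM : matchAt tokens label m <;> simp [hA, hC, hM]
      · -- the tail after the span
        rcases Nat.eq_or_lt_of_le hele with rfl | helt
        · rw [buildKeep]
          simp
        · have hte : tmpAt tags e = false := by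
            rcases hbs with h1 | h2
            · omega
            · exact h2
          exact ih (n - e) (by omega) e (by simp [hte]) rfl
    · -- non-TMP token: kept, recurse at i+1
      simp only [hin, hti, dif_pos]
      obtain ⟨c, hc1, hc2⟩ : ∃ c, n - i = c + 1 ∧ n - (i + 1) = c :=
        ⟨n - i - 1, by omega, by omega⟩
      rw [hc1, List.range'_succ, List.map_cons]
      have hdi : decA tokens tags label n i = true := by rw [decA]; simp [hti]
      rw [hdi, ih c (by omega) (i + 1) (fun _ => Or.inr (by simpa using hti)) hc2, hc2]
      simp
  · rw [dif_neg hin, show n - i = 0 from by omega]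
    simp

-- ===== VERDICT (by name: the statement is the Claim_ definition above) =====
theorem get_stripped_tmp_only_spec : Claim_equal_get_stripped_tmp_only := by
  intro tokens tags orig_verb_pos label _ _
  unfold Spec_get_stripped_tmp_only
  have hkeep : buildKeep tokens tags label tokens.length 0
      = (List.range tokens.length).map (decA tokens tags label tokens.length) := by
    have h := buildKeep_eq_map tokens tags label tokens.length 0 (fun _ => Or.inl rfl)
    simpa [List.range_eq_range'] using h
  simp only [get_stripped_tmp_only, get_stripped_tmp_only_alt]
  apply PySem.List.foldl_congr_mem
  intro acc i hi
  have hin : i < tokens.length := List.mem_range.mp hi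
  have hg : (buildKeep tokens tags label tokens.length 0).getD i true
      = decA tokens tags label tokens.length i := by
    rw [hkeep]; exact PySem.List.getD_map_range _ _ _ _ hin
  have hg' : (buildKeep tokens tags label tokens.length 0)[i]?.getD true
      = decA tokens tags label tokens.length i := by
    simpa [List.getD_eq_getElem?_getD] using hg
  by_cases hti : tmpAt tags i = true
  · simp [hti, hg', decA]
  · simp [hti, hg', decA]
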